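-- pv_equiv track=rewrite | github.com/thangdam97/MTL-Studio | pipeline/pipeline/librarian/content_splitter.py | detect_paragraph_clusters
-- ===== SOURCE A (Python) =====
-- from typing import List, Tuple, Optional
--
-- def detect_paragraph_clusters(lines: List[str]) -> List[int]:
--     """
--     Detect natural breaking points based on empty line clusters.
--
--     Returns:
--         List of line indices where 3+ consecutive empty lines occur
--     """
--     breaks = []
--     empty_count = 0
--
--     for idx, line in enumerate(lines):
--         if not line.strip():
--             empty_count += 1
--         else:
--             if empty_count >= 3:
--                 breaks.append(idx - empty_count // 2)  # Mid-point of empty cluster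
--             empty_count = 0
--
--     return breaks
-- ===== SOURCE B (Python) =====
-- def detect_paragraph_clusters(lines):
--     """Gap-based re-implementation: never counts empty lines. Extract the
--     indices of non-empty lines; each break comes from a pair of adjacent
--     non-empty indices (with a -1 sentinel in front) whose gap is >= 3.
--     A trailing empty run has no closing non-empty index, so it drops out."""
--     nonempty = [i for i, line in enumerate(lines) if line.strip()]
--     breaks = []
--     for prev, cur in zip([-1] + nonempty, nonempty):
--         gap = cur - prev - 1
--         if gap >= 3:
--             breaks.append(cur - gap // 2)
--     return breaks
-- ===== Notes on version B (the rewrite author's own statement) =====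
-- stated objective: alternative
-- what changed: B never counts empty lines: it extracts the indices of the non-empty lines and derives each break from the gap between adjacent non-empty indices (with a -1 sentinel), so a trailing empty run drops out automatically, instead of A's running empty_count loop.
import Mathlib
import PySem

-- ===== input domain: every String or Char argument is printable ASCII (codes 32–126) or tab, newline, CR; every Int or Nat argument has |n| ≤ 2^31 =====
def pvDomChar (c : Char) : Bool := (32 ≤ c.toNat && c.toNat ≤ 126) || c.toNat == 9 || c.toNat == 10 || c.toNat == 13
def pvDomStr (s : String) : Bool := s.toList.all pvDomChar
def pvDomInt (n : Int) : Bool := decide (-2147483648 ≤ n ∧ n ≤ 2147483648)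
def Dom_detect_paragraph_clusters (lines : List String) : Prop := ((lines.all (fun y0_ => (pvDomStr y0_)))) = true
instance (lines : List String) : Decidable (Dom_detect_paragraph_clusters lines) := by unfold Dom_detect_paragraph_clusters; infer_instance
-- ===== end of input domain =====

-- B replaces A's running empty_count loop by gap arithmetic over the list of non-empty line indices; objective: alternative algorithm, same cost.

-- ===== PORT A =====
-- A: single pass with a running empty_count, appending idx - empty_count // 2 when a non-empty line closes a run of >= 3 empties.
def detect_paragraph_clusters (lines : List String) : List Int :=
  ((PySem.List.enumerate lines 0).foldl
    (fun (st : List Int × Int) (p : Int × String) =>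
      if PySem.Str.strip p.2 = "" then (st.1, st.2 + 1)
      else (if st.2 ≥ 3 then st.1 ++ [p.1 - PySem.Int.floordiv st.2 2] else st.1, 0))
    ([], 0)).1

-- ===== PORT B =====
-- B: nonempty = indices of non-empty lines; breaks from adjacent pairs of (-1 :: nonempty) zipped with nonempty.
def detect_paragraph_clusters_alt (lines : List String) : List Int :=
  let nonempty : List Int :=
    ((PySem.List.enumerate lines 0).filter (fun p => !(PySem.Str.strip p.2 == ""))).map Prod.fst
  ((((-1 : Int) :: nonempty).zip nonempty).foldl
    (fun (breaks : List Int) (pc : Int × Int) =>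
      let gap := pc.2 - pc.1 - 1
      if gap ≥ 3 then breaks ++ [pc.2 - PySem.Int.floordiv gap 2] else breaks)
    [])

-- ===== PRECONDITION & SPEC =====
def Spec_detect_paragraph_clusters (lines : List String) (out : List Int) : Prop := out = detect_paragraph_clusters_alt lines
instance (lines : List String) (out : List Int) : Decidable (Spec_detect_paragraph_clusters lines out) := by unfold Spec_detect_paragraph_clusters; infer_instance

-- ===== CLAIM (what is proved, stated in full; the proofs are below) =====
def Claim_equal_detect_paragraph_clusters : Prop := ∀ (lines : List String), Dom_detect_paragraph_clusters lines → Spec_detect_paragraph_clusters lines (detect_paragraph_clusters lines)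

-- ===== LEMMAS AND PROOFS =====

-- Recursive description of A's loop: remaining emissions from position i with c pending empties.
def aLoop : List String → Nat → Nat → List Int
  | [], _, _ => []
  | l :: ls, i, c =>
    if PySem.Str.strip l = "" then aLoop ls (i + 1) (c + 1)
    else (if 3 ≤ c then [((i : Int) - ((c / 2 : Nat) : Int))] else []) ++ aLoop ls (i + 1) 0

-- indices of the non-empty lines, scan starting at index i
def idxFrom : List String → Nat → List Int
  | [], _ => []
  | l :: ls, i =>
    if PySem.Str.strip l = "" then idxFrom ls (i + 1) else (i : Int) :: idxFrom ls (i + 1)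

-- Recursive description of B's zip-fold, with the previous non-empty index as state.
def gapEmit : Int → List Int → List Int
  | _, [] => []
  | prev, cur :: rest =>
    (if cur - prev - 1 ≥ 3 then [cur - PySem.Int.floordiv (cur - prev - 1) 2] else [])
      ++ gapEmit cur rest

theorem foldl_eq_aLoop (ls : List String) (acc : List Int) (i c : Nat) :
    ((PySem.List.enumerate ls (i : Int)).foldl
      (fun (st : List Int × Int) (p : Int × String) =>
        if PySem.Str.strip p.2 = "" then (st.1, st.2 + 1)
        else (if st.2 ≥ 3 then st.1 ++ [p.1 - PySem.Int.floordiv st.2 2] else st.1, 0))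
      (acc, (c : Int))).1 = acc ++ aLoop ls i c := by
  induction ls generalizing acc i c with
  | nil => simp [aLoop, PySem.List.enumerate_nil]
  | cons l ls ih =>
    rw [PySem.List.enumerate_cons]
    by_cases h : PySem.Str.strip l = ""
    · have hcast : ((c : Int) + 1) = ((c + 1 : Nat) : Int) := by push_cast; ring
      simp only [List.foldl_cons, if_pos h, hcast]
      have := ih acc (i + 1) (c + 1)
      simp only [Nat.cast_add, Nat.cast_one] at this ⊢
      rw [this]
      simp [aLoop, h]
    · simp only [List.foldl_cons, if_neg h]
      by_cases hc : (3 : Int) ≤ (c : Nat)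
      · have hc' : 3 ≤ c := by exact_mod_cast hc
        have hv : (i : Int) - PySem.Int.floordiv (c : Nat) 2 = (i : Int) - ((c / 2 : Nat) : Int) := by
          rw [show (2 : Int) = ((2 : Nat) : Int) from rfl, PySem.Int.floordiv_natCast]
        simp only [ge_iff_le, if_pos hc, hv]
        have := ih (acc ++ [(i : Int) - ((c / 2 : Nat) : Int)]) (i + 1) 0
        simp only [Nat.cast_add, Nat.cast_one, Nat.cast_zero] at this ⊢
        rw [this]
        simp [aLoop, h, hc']
      · have hc' : ¬ 3 ≤ c := by exact_mod_cast hc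
        simp only [ge_iff_le, if_neg hc]
        have := ih acc (i + 1) 0
        simp only [Nat.cast_add, Nat.cast_one, Nat.cast_zero] at this ⊢
        rw [this]
        simp [aLoop, h, hc']

-- B's nonempty list equals idxFrom.
theorem filter_map_eq_idxFrom (ls : List String) (i : Nat) :
    ((PySem.List.enumerate ls (i : Int)).filter (fun p => !(PySem.Str.strip p.2 == ""))).map Prod.fst
      = idxFrom ls i := by
  induction ls generalizing i with
  | nil => simp [idxFrom, PySem.List.enumerate_nil]
  | cons l ls ih =>
    rw [PySem.List.enumerate_cons]
    by_cases h : PySem.Str.strip l = ""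
    · have := ih (i + 1)
      simp only [Nat.cast_add, Nat.cast_one] at this
      simp [h, idxFrom, this]
    · have := ih (i + 1)
      simp only [Nat.cast_add, Nat.cast_one] at this
      simp [h, idxFrom, this]

-- B's zip-fold equals gapEmit.
theorem zip_foldl_eq_gapEmit (idxs : List Int) (prev : Int) (acc : List Int) :
    (((prev :: idxs).zip idxs).foldl
      (fun (breaks : List Int) (pc : Int × Int) =>
        let gap := pc.2 - pc.1 - 1
        if gap ≥ 3 then breaks ++ [pc.2 - PySem.Int.floordiv gap 2] else breaks)
      acc) = acc ++ gapEmit prev idxs := by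
  induction idxs generalizing prev acc with
  | nil => simp [gapEmit]
  | cons cur rest ih =>
    show ((prev, cur) :: ((cur :: rest).zip rest)).foldl _ acc = _
    by_cases h : cur - prev - 1 ≥ 3
    · simp only [List.foldl_cons, if_pos h]
      rw [ih cur (acc ++ [cur - PySem.Int.floordiv (cur - prev - 1) 2])]
      simp [gapEmit, h]
    · simp only [List.foldl_cons, if_neg h]
      rw [ih cur acc]
      simp [gapEmit, h]

-- A's loop with c pending empties equals B's gap emission with prev = i - c - 1.
theorem aLoop_eq_gapEmit (ls : List String) (i c : Nat) :
    aLoop ls i c = gapEmit ((i : Int) - (c : Int) - 1) (idxFrom ls i) := by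
  induction ls generalizing i c with
  | nil => simp [aLoop, idxFrom, gapEmit]
  | cons l ls ih =>
    by_cases h : PySem.Str.strip l = ""
    · rw [show aLoop (l :: ls) i c = aLoop ls (i + 1) (c + 1) from by simp [aLoop, h],
          show idxFrom (l :: ls) i = idxFrom ls (i + 1) from by simp [idxFrom, h],
          ih (i + 1) (c + 1)]
      congr 1
      push_cast; ring
    · rw [show aLoop (l :: ls) i c
            = (if 3 ≤ c then [((i : Int) - ((c / 2 : Nat) : Int))] else []) ++ aLoop ls (i + 1) 0
          from by simp [aLoop, h],
          show idxFrom (l :: ls) i = (i : Int) :: idxFrom ls (i + 1) from by simp [idxFrom, h]]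
      rw [show gapEmit ((i : Int) - (c : Int) - 1) ((i : Int) :: idxFrom ls (i + 1))
            = (if (i : Int) - ((i : Int) - (c : Int) - 1) - 1 ≥ 3
                then [(i : Int) - PySem.Int.floordiv ((i : Int) - ((i : Int) - (c : Int) - 1) - 1) 2]
                else [])
              ++ gapEmit (i : Int) (idxFrom ls (i + 1)) from rfl]
      have hgap : (i : Int) - ((i : Int) - (c : Int) - 1) - 1 = (c : Int) := by ring
      rw [hgap]
      have hprev : ((i + 1 : Nat) : Int) - ((0 : Nat) : Int) - 1 = (i : Int) := by push_cast; ring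
      rw [ih (i + 1) 0, hprev]
      congr 1
      by_cases hc : 3 ≤ c
      · have hc' : (3 : Int) ≤ (c : Nat) := by exact_mod_cast hc
        rw [if_pos hc, if_pos hc']
        rw [show (2 : Int) = ((2 : Nat) : Int) from rfl, PySem.Int.floordiv_natCast]
      · have hc' : ¬ (3 : Int) ≤ (c : Nat) := by exact_mod_cast hc
        rw [if_neg hc, if_neg hc']

-- ===== VERDICT (by name: the statement is the Claim_ definition above) =====
theorem detect_paragraph_clusters_spec : Claim_equal_detect_paragraph_clusters := by
  intro lines _
  unfold Spec_detect_paragraph_clusters detect_paragraph_clusters detect_paragraph_clusters_alt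
  have h1 := foldl_eq_aLoop lines [] 0 0
  simp only [Nat.cast_zero] at h1
  rw [h1]
  have h2 := filter_map_eq_idxFrom lines 0
  simp only [Nat.cast_zero] at h2
  rw [h2]
  rw [zip_foldl_eq_gapEmit (idxFrom lines 0) (-1) []]
  have := aLoop_eq_gapEmit lines 0 0
  simpa using this
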